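-- pv_equiv track=rewrite | github.com/Conorodwyer17/UGV_WS | src/Tyre_Inspection_Bot/src/amr_hardware/src/segment_3d/segmentation_3d/scripts/simulated_detection_node.py | _mask_from_center
-- ===== SOURCE A (Python) =====
-- def _mask_from_center(center_u: int, center_v: int, radius: int, width: int, height: int) -> tuple:
--     """Generate x_indices, y_indices for a circular mask around center."""
--     x_indices, y_indices = [], []
--     for du in range(-radius, radius + 1):
--         for dv in range(-radius, radius + 1):
--             if du * du + dv * dv <= radius * radius:
--                 u = center_u + du
--                 v = center_v + dv
--                 if 0 <= u < width and 0 <= v < height: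
--                     x_indices.append(u)
--                     y_indices.append(v)
--     return (x_indices, y_indices)
-- ===== SOURCE B (Python) =====
-- def _isqrt(t):
--     lo, hi = 0, t + 1
--     while lo + 1 < hi:
--         mid = (lo + hi) // 2
--         if mid * mid <= t:
--             lo = mid
--         else:
--             hi = mid
--     return lo
--
--
-- def _mask_from_center(center_u: int, center_v: int, radius: int, width: int, height: int) -> tuple:
--     """Generate x_indices, y_indices for a circular mask around center."""
--     x_indices, y_indices = [], []
--     for du in range(-radius, radius + 1):
--         u = center_u + du
--         if 0 <= u < width:
--             s = _isqrt(radius * radius - du * du)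
--             lo = max(-s, -center_v)
--             hi = min(s, height - 1 - center_v)
--             span = list(range(center_v + lo, center_v + hi + 1))
--             x_indices.extend([u] * len(span))
--             y_indices.extend(span)
--     return (x_indices, y_indices)
-- ===== Notes on version B (the rewrite author's own statement) =====
-- stated objective: faster
-- what changed: Replaces the per-cell circle-membership test over the full (2r+1)x(2r+1) bounding box by a per-row closed form: a binary-search integer sqrt gives each row's exact half-span, which is intersected with the image bounds to yield the row's valid v-range directly; rows with u out of bounds are skipped entirely.
import Mathlib
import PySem

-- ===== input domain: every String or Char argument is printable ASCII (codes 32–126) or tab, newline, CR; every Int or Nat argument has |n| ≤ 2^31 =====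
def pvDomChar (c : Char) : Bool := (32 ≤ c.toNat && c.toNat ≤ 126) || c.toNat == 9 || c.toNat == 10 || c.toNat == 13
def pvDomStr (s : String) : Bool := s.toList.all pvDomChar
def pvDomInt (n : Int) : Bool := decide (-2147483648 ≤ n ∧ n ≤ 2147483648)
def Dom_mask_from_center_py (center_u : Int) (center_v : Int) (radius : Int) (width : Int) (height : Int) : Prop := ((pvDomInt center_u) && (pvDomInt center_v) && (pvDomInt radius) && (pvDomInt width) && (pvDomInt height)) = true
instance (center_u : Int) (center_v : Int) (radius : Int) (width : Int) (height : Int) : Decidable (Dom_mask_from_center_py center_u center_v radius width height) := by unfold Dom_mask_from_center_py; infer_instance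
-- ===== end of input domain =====

-- B replaces the per-cell circle test over the bounding box by a per-row closed-form
-- column span (integer sqrt + clipping), producing the same index lists faster.


-- ===== PORT A =====
def mask_from_center_py (center_u : Int) (center_v : Int) (radius : Int) (width : Int) (height : Int) : List Int × List Int :=
  (PySem.List.pyRange (-radius) (radius + 1) 1).foldl (fun acc du =>
    (PySem.List.pyRange (-radius) (radius + 1) 1).foldl (fun acc2 dv =>
      if du * du + dv * dv ≤ radius * radius then
        let u := center_u + du
        let v := center_v + dv
        if 0 ≤ u ∧ u < width ∧ 0 ≤ v ∧ v < height then
          (acc2.1 ++ [u], acc2.2 ++ [v])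
        else acc2
      else acc2) acc) ([], [])

-- ===== PORT B =====
-- hand-written binary-search integer sqrt of Source B (lo/hi bisection on mid*mid <= t)
def pyIsqrtGo (t : Int) (lo : Int) (hi : Int) : Int :=
  if lo + 1 < hi then
    if PySem.Int.floordiv (lo + hi) 2 * PySem.Int.floordiv (lo + hi) 2 ≤ t then
      pyIsqrtGo t (PySem.Int.floordiv (lo + hi) 2) hi
    else pyIsqrtGo t lo (PySem.Int.floordiv (lo + hi) 2)
  else lo
termination_by (hi - lo).toNat
decreasing_by
  all_goals simp only [PySem.Int.floordiv, Int.fdiv_eq_ediv] at *; omega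

def pyIsqrt (t : Int) : Int := pyIsqrtGo t 0 (t + 1)

def mask_from_center_py_alt (center_u : Int) (center_v : Int) (radius : Int) (width : Int) (height : Int) : List Int × List Int :=
  (PySem.List.pyRange (-radius) (radius + 1) 1).foldl (fun acc du =>
    let u := center_u + du
    if 0 ≤ u ∧ u < width then
      let s := pyIsqrt (radius * radius - du * du)
      let lo := max (-s) (-center_v)
      let hi := min s (height - 1 - center_v)
      let span := PySem.List.pyRange (center_v + lo) (center_v + hi + 1) 1
      (acc.1 ++ List.replicate span.length u, acc.2 ++ span)
    else acc) ([], [])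

-- ===== PRECONDITION & SPEC =====
def Spec_mask_from_center_py (center_u : Int) (center_v : Int) (radius : Int) (width : Int) (height : Int) (out : List Int × List Int) : Prop := out = mask_from_center_py_alt center_u center_v radius width height
instance (center_u : Int) (center_v : Int) (radius : Int) (width : Int) (height : Int) (out : List Int × List Int) : Decidable (Spec_mask_from_center_py center_u center_v radius width height out) := by unfold Spec_mask_from_center_py; infer_instance

-- ===== CLAIM (what is proved, stated in full; the proofs are below) =====
def Claim_equal_mask_from_center_py : Prop := ∀ (center_u : Int) (center_v : Int) (radius : Int) (width : Int) (height : Int), Dom_mask_from_center_py center_u center_v radius width height → Spec_mask_from_center_py center_u center_v radius width height (mask_from_center_py center_u center_v radius width height)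

-- ===== LEMMAS AND PROOFS =====

theorem pyIsqrtGo_spec (t lo hi : Int) (h0 : 0 ≤ lo) (h1 : lo * lo ≤ t) (h2 : t < hi * hi)
    (h3 : lo < hi) :
    0 ≤ pyIsqrtGo t lo hi ∧ pyIsqrtGo t lo hi * pyIsqrtGo t lo hi ≤ t ∧
      t < (pyIsqrtGo t lo hi + 1) * (pyIsqrtGo t lo hi + 1) := by
  fun_induction pyIsqrtGo t lo hi with
  | case1 lo hi hlt hle ih =>
      refine ih ?_ hle h2 ?_ <;> simp only [PySem.Int.floordiv, Int.fdiv_eq_ediv] at * <;> omega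
  | case2 lo hi hlt hle ih =>
      refine ih h0 h1 (by omega) ?_
      simp only [PySem.Int.floordiv, Int.fdiv_eq_ediv] at * ; omega
  | case3 lo hi hlt =>
      have he : hi = lo + 1 := by omega
      rw [he] at h2
      exact ⟨h0, h1, h2⟩

theorem pyIsqrt_spec (t : Int) (ht : 0 ≤ t) :
    0 ≤ pyIsqrt t ∧ pyIsqrt t * pyIsqrt t ≤ t ∧ t < (pyIsqrt t + 1) * (pyIsqrt t + 1) := by
  exact pyIsqrtGo_spec t 0 (t + 1) le_rfl (by simpa using ht) (by nlinarith) (by omega)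

-- dv² ≤ t  ↔  -isqrt t ≤ dv ≤ isqrt t
theorem sq_le_iff_abs_le_isqrt (t dv : Int) (ht : 0 ≤ t) :
    dv * dv ≤ t ↔ (-pyIsqrt t ≤ dv ∧ dv ≤ pyIsqrt t) := by
  obtain ⟨h0, h1, h2⟩ := pyIsqrt_spec t ht
  constructor
  · intro h
    constructor
    · by_contra hc; push Not at hc; nlinarith
    · by_contra hc; push Not at hc; nlinarith
  · intro ⟨hl, hr⟩; nlinarith

theorem filter_pyRange_interval (a b lo hi : Int) (h1 : a ≤ lo) (h2 : hi < b) :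
    (PySem.List.pyRange a b 1).filter (fun dv => decide (lo ≤ dv ∧ dv ≤ hi))
      = PySem.List.pyRange lo (hi + 1) 1 := by
  by_cases hle : lo ≤ hi
  · rw [PySem.List.pyRange_one_append a lo b h1 (by omega),
        PySem.List.pyRange_one_append lo (hi + 1) b (by omega) (by omega),
        List.filter_append, List.filter_append]
    have e1 : (PySem.List.pyRange a lo 1).filter (fun dv => decide (lo ≤ dv ∧ dv ≤ hi)) = [] := by
      rw [List.filter_eq_nil_iff]
      intro x hx
      rw [PySem.List.mem_pyRange_one] at hx
      simp; omega
    have e2 : (PySem.List.pyRange lo (hi + 1) 1).filter (fun dv => decide (lo ≤ dv ∧ dv ≤ hi))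
        = PySem.List.pyRange lo (hi + 1) 1 := by
      rw [List.filter_eq_self]
      intro x hx
      rw [PySem.List.mem_pyRange_one] at hx
      simp; omega
    have e3 : (PySem.List.pyRange (hi + 1) b 1).filter (fun dv => decide (lo ≤ dv ∧ dv ≤ hi)) = [] := by
      rw [List.filter_eq_nil_iff]
      intro x hx
      rw [PySem.List.mem_pyRange_one] at hx
      simp; omega
    rw [e1, e2, e3]; simp
  · have hnil : PySem.List.pyRange lo (hi + 1) 1 = [] := PySem.List.pyRange_one_eq_nil (by omega)
    rw [hnil, List.filter_eq_nil_iff]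
    intro x hx
    rw [PySem.List.mem_pyRange_one] at hx
    simp; omega

theorem map_add_pyRange (c lo hi : Int) :
    (PySem.List.pyRange lo hi 1).map (fun dv => c + dv) = PySem.List.pyRange (c + lo) (c + hi) 1 := by
  rw [PySem.List.pyRange_one, PySem.List.pyRange_one, List.map_map]
  have : (c + hi - (c + lo)) = hi - lo := by ring
  rw [this]
  apply List.map_congr_left
  intro k _
  simp; ring

-- the per-du row of A equals the per-du step of B, for du in the outer range
theorem row_eq (center_u center_v radius width height du : Int)
    (hdu : -radius ≤ du ∧ du < radius + 1) (acc : List Int × List Int) :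
    (PySem.List.pyRange (-radius) (radius + 1) 1).foldl (fun acc2 dv =>
      if du * du + dv * dv ≤ radius * radius then
        let u := center_u + du
        let v := center_v + dv
        if 0 ≤ u ∧ u < width ∧ 0 ≤ v ∧ v < height then
          (acc2.1 ++ [u], acc2.2 ++ [v])
        else acc2
      else acc2) acc
    = (let u := center_u + du
       if 0 ≤ u ∧ u < width then
         let s := pyIsqrt (radius * radius - du * du)
         let lo := max (-s) (-center_v)
         let hi := min s (height - 1 - center_v)
         let span := PySem.List.pyRange (center_v + lo) (center_v + hi + 1) 1
         (acc.1 ++ List.replicate span.length (center_u + du), acc.2 ++ span)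
       else acc) := by
  have hr : 0 ≤ radius := by omega
  have hdusq : du * du ≤ radius * radius := by nlinarith
  have ht : 0 ≤ radius * radius - du * du := by omega
  set t := radius * radius - du * du with htdef
  obtain ⟨hs0, hs1, hs2⟩ := pyIsqrt_spec t ht
  set s := pyIsqrt t with hsdef
  have hsr : s ≤ radius := by nlinarith
  -- rewrite A's inner step into product-of-appends shape
  have step_eq : ∀ (acc2 : List Int × List Int) (dv : Int),
      (if du * du + dv * dv ≤ radius * radius then
        let u := center_u + du
        let v := center_v + dv
        if 0 ≤ u ∧ u < width ∧ 0 ≤ v ∧ v < height then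
          (acc2.1 ++ [u], acc2.2 ++ [v])
        else acc2
      else acc2)
      = ((if (0 ≤ center_u + du ∧ center_u + du < width) ∧
            (max (-s) (-center_v) ≤ dv ∧ dv ≤ min s (height - 1 - center_v))
          then acc2.1 ++ [center_u + du] else acc2.1),
         (if (0 ≤ center_u + du ∧ center_u + du < width) ∧
            (max (-s) (-center_v) ≤ dv ∧ dv ≤ min s (height - 1 - center_v))
          then acc2.2 ++ [center_v + dv] else acc2.2)) := by
    intro acc2 dv
    have habs := sq_le_iff_abs_le_isqrt t dv ht
    by_cases hC : (0 ≤ center_u + du ∧ center_u + du < width) ∧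
        (max (-s) (-center_v) ≤ dv ∧ dv ≤ min s (height - 1 - center_v))
    · have c1 : du * du + dv * dv ≤ radius * radius := by
        have := habs.mpr ⟨by omega, by omega⟩; omega
      have c2 : 0 ≤ center_u + du ∧ center_u + du < width ∧
          0 ≤ center_v + dv ∧ center_v + dv < height := by omega
      rw [if_pos c1, if_pos c2, if_pos hC, if_pos hC]
    · rw [if_neg hC, if_neg hC]
      by_cases c1 : du * du + dv * dv ≤ radius * radius
      · have h2 := habs.mp (by omega)
        have c2 : ¬(0 ≤ center_u + du ∧ center_u + du < width ∧
            0 ≤ center_v + dv ∧ center_v + dv < height) := by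
          intro hc; exact hC ⟨⟨hc.1, hc.2.1⟩, by omega⟩
        rw [if_pos c1, if_neg c2]
      · rw [if_neg c1]
  rw [PySem.List.foldl_congr_mem _ _ (fun acc2 dv =>
      ((if (0 ≤ center_u + du ∧ center_u + du < width) ∧
            (max (-s) (-center_v) ≤ dv ∧ dv ≤ min s (height - 1 - center_v))
          then acc2.1 ++ [center_u + du] else acc2.1),
       (if (0 ≤ center_u + du ∧ center_u + du < width) ∧
            (max (-s) (-center_v) ≤ dv ∧ dv ≤ min s (height - 1 - center_v))
          then acc2.2 ++ [center_v + dv] else acc2.2))) _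
      (fun acc2 dv _ => step_eq acc2 dv)]
  obtain ⟨a1, a2⟩ := acc
  rw [PySem.List.foldl_prod_mk
      (fun a dv => if (0 ≤ center_u + du ∧ center_u + du < width) ∧
            (max (-s) (-center_v) ≤ dv ∧ dv ≤ min s (height - 1 - center_v))
          then a ++ [center_u + du] else a)
      (fun a dv => if (0 ≤ center_u + du ∧ center_u + du < width) ∧
            (max (-s) (-center_v) ≤ dv ∧ dv ≤ min s (height - 1 - center_v))
          then a ++ [center_v + dv] else a)]
  show _ = (if 0 ≤ center_u + du ∧ center_u + du < width then
      (a1 ++ List.replicate (PySem.List.pyRange (center_v + max (-s) (-center_v)) (center_v + min s (height - 1 - center_v) + 1) 1).length (center_u + du),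
       a2 ++ PySem.List.pyRange (center_v + max (-s) (-center_v)) (center_v + min s (height - 1 - center_v) + 1) 1)
    else (a1, a2))
  by_cases hu : 0 ≤ center_u + du ∧ center_u + du < width
  · rw [if_pos hu]
    simp only [hu, true_and]
    have e1 : (PySem.List.pyRange (-radius) (radius + 1) 1).foldl
        (fun a dv => if max (-s) (-center_v) ≤ dv ∧ dv ≤ min s (height - 1 - center_v)
          then a ++ [center_u + du] else a) a1
        = a1 ++ ((PySem.List.pyRange (-radius) (radius + 1) 1).filter
            (fun dv => decide (max (-s) (-center_v) ≤ dv ∧ dv ≤ min s (height - 1 - center_v)))).map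
            (fun _ => center_u + du) := by
      exact PySem.List.foldl_append_ite _ _ _ _
    have e2 : (PySem.List.pyRange (-radius) (radius + 1) 1).foldl
        (fun a dv => if max (-s) (-center_v) ≤ dv ∧ dv ≤ min s (height - 1 - center_v)
          then a ++ [center_v + dv] else a) a2
        = a2 ++ ((PySem.List.pyRange (-radius) (radius + 1) 1).filter
            (fun dv => decide (max (-s) (-center_v) ≤ dv ∧ dv ≤ min s (height - 1 - center_v)))).map
            (fun dv => center_v + dv) := by
      exact PySem.List.foldl_append_ite _ _ _ _
    rw [e1, e2, filter_pyRange_interval _ _ _ _ (by omega) (by omega)]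
    refine Prod.ext ?_ ?_
    · show a1 ++ _ = a1 ++ _
      rw [List.map_const', PySem.List.length_pyRange_one, PySem.List.length_pyRange_one]
      congr 2
      omega
    · show a2 ++ _ = a2 ++ _
      rw [map_add_pyRange]
      congr 2
      ring
  · rw [if_neg hu]
    refine Prod.ext ?_ ?_ <;>
    · show List.foldl _ _ (PySem.List.pyRange (-radius) (radius + 1) 1) = _
      generalize PySem.List.pyRange (-radius) (radius + 1) 1 = L
      simp only [hu, false_and, if_false]
      induction L with
      | nil => rfl
      | cons x xs ih => simp only [List.foldl_cons]; exact ih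

-- ===== VERDICT (by name: the statement is the Claim_ definition above) =====
theorem mask_from_center_py_spec : Claim_equal_mask_from_center_py := by
  intro center_u center_v radius width height _
  unfold Spec_mask_from_center_py mask_from_center_py mask_from_center_py_alt
  apply PySem.List.foldl_congr_mem
  intro acc du hdu
  rw [PySem.List.mem_pyRange_one] at hdu
  exact row_eq center_u center_v radius width height du hdu acc
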